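-- pv_equiv track=rewrite | github.com/RamananVr/Leetcodepython | arrays_two_pointers/2004_The_Number_of_Subsets_That_Satisfy_the_Given_Sum_Condition.py | numSubseq
-- ===== SOURCE A (Python) =====
-- from typing import List
--
-- def numSubseq(nums: List[int], target: int) -> int:
--     MOD = 10**9 + 7
--     nums.sort()
--     n = len(nums)
--
--     # Precompute powers of 2 up to n
--     power_of_two = [1] * n
--     for i in range(1, n):
--         power_of_two[i] = (power_of_two[i - 1] * 2) % MOD
--
--     left, right = 0, n - 1
--     result = 0
--
--     while left <= right:
--         if nums[left] + nums[right] <= target: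
--             # All subsets formed by nums[left] and any combination of elements between left+1 and right
--             result += power_of_two[right - left]
--             result %= MOD
--             left += 1
--         else:
--             right -= 1
--
--     return result
-- ===== SOURCE B (Python) =====
-- from typing import List
--
-- def _bisect_right(a: List[int], x: int) -> int:
--     # hand-written bisect.bisect_right (A imports no stdlib modules we could reuse)
--     lo, hi = 0, len(a)
--     while lo < hi:
--         mid = (lo + hi) // 2
--         if x < a[mid]:
--             hi = mid
--         else:
--             lo = mid + 1
--     return lo
--
-- def numSubseq(nums: List[int], target: int) -> int:
--     # Per-minimum binary search instead of the two-pointer sweep.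
--     # (Like A, this sorts `nums` in place; the equivalence is about the return value.)
--     MOD = 10**9 + 7
--     nums.sort()
--     n = len(nums)
--     power_of_two = [1] * n
--     for i in range(1, n):
--         power_of_two[i] = (power_of_two[i - 1] * 2) % MOD
--     result = 0
--     for i in range(n):
--         j = _bisect_right(nums, target - nums[i]) - 1
--         if i <= j:
--             result = (result + power_of_two[j - i]) % MOD
--     return result
-- ===== Notes on version B (the rewrite author's own statement) =====
-- stated objective: alternative
-- what changed: Replaces the two-pointer sweep with an independent per-minimum pass: for each i a hand-written binary search (bisect_right) finds the largest j with nums[i]+nums[j] <= target, contributing 2^(j-i) when j >= i; the sort and modular power table are kept. Like A, B sorts nums in place; only the return value is claimed.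
import Mathlib
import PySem

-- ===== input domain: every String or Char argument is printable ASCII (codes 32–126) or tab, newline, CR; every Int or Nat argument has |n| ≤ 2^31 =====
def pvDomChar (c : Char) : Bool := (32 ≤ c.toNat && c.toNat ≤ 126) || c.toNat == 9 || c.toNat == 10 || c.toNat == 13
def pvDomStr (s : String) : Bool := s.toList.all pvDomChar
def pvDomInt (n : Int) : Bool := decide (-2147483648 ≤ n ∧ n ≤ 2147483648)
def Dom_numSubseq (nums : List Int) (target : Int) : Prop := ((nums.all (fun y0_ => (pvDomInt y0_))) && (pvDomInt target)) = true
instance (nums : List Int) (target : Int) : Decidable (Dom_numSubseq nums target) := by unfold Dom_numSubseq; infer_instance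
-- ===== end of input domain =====

-- B replaces A's two-pointer sweep by an independent per-minimum binary search; same sort
-- and modular power-of-two table (objective: alternative, same asymptotic cost).
-- Both Pythons sort `nums` in place; the equivalence proved here is about the return value only.

-- ===== PORT A =====

def pvMOD : Int := 1000000007

-- power_of_two[i] = (power_of_two[i-1] * 2) % MOD, power_of_two[0] = 1; the table built by
-- A's (and B's, identical) loop is exactly (List.range n).map pvPow.
def pvPow : Nat → Int
  | 0 => 1
  | k + 1 => (pvPow k * 2) % pvMOD

-- the `while left <= right` loop of A (indices always in range when read, see proofs)
def numSubseqLoop (s pw : List Int) (target : Int) (l r acc : Int) : Int :=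
  if l ≤ r then
    if PySem.List.pyGetD s l 0 + PySem.List.pyGetD s r 0 ≤ target then
      numSubseqLoop s pw target (l + 1) r ((acc + PySem.List.pyGetD pw (r - l) 0) % pvMOD)
    else
      numSubseqLoop s pw target l (r - 1) acc
  else acc
termination_by (r + 1 - l).toNat
decreasing_by all_goals omega

def numSubseq (nums : List Int) (target : Int) : Int :=
  let s := PySem.List.sorted nums (fun x => x)
  let n := s.length
  let pw := (List.range n).map pvPow
  numSubseqLoop s pw target 0 ((n : Int) - 1) 0

-- ===== PORT B =====

-- body of B's `for i in range(n)` loop; `_bisect_right` in Source B is bisect.bisect_right's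
-- loop verbatim, which PySem.List.bisectRight implements exactly
def pvStep (s pw : List Int) (target acc : Int) (i : Nat) : Int :=
  let j : Int := (PySem.List.bisectRight s (target - PySem.List.pyGetD s (i : Int) 0) : Int) - 1
  if (i : Int) ≤ j then (acc + PySem.List.pyGetD pw (j - (i : Int)) 0) % pvMOD else acc

def numSubseq_alt (nums : List Int) (target : Int) : Int :=
  let s := PySem.List.sorted nums (fun x => x)
  let n := s.length
  let pw := (List.range n).map pvPow
  (List.range n).foldl (pvStep s pw target) 0

-- ===== PRECONDITION & SPEC =====
def Spec_numSubseq (nums : List Int) (target : Int) (out : Int) : Prop := out = numSubseq_alt nums target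
instance (nums : List Int) (target : Int) (out : Int) : Decidable (Spec_numSubseq nums target out) := by unfold Spec_numSubseq; infer_instance

-- ===== CLAIM (what is proved, stated in full; the proofs are below) =====
def Claim_equal_numSubseq : Prop := ∀ (nums : List Int) (target : Int), Dom_numSubseq nums target → Spec_numSubseq nums target (numSubseq nums target)

-- ===== LEMMAS AND PROOFS =====

-- sorted lists are monotone at getD-indices
lemma pv_mono (s : List Int) (hs : s.Pairwise (· ≤ ·)) (a b : Nat)
    (hab : a ≤ b) (hb : b < s.length) : s.getD a 0 ≤ s.getD b 0 := by
  rcases Nat.lt_or_eq_of_le hab with h | h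
  · rw [List.getD_eq_getElem _ _ (by omega), List.getD_eq_getElem _ _ hb]
    exact List.pairwise_iff_getElem.mp hs a b (by omega) hb h
  · subst h; rfl

-- uniqueness characterisation of bisect_right on a sorted list
lemma pv_bisect_eq (s : List Int) (x : Int) (hs : s.Pairwise (· ≤ ·)) (c : Nat)
    (hc : c ≤ s.length)
    (h1 : ∀ idx : Nat, idx < c → s.getD idx 0 ≤ x)
    (h2 : ∀ idx : Nat, c ≤ idx → idx < s.length → x < s.getD idx 0) :
    PySem.List.bisectRight s x = c := by
  obtain ⟨hb0, hb1, hb2⟩ := PySem.List.bisectRight_spec s x hs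
  set b := PySem.List.bisectRight s x with hb
  rcases Nat.lt_trichotomy b c with h | h | h
  · have hblen : b < s.length := by omega
    have := hb2 b hblen (le_refl _)
    have := h1 b h
    rw [List.getD_eq_getElem _ _ hblen] at this
    omega
  · exact h
  · have hclen : c < s.length := by omega
    have := hb1 c hclen h
    have := h2 c (le_refl _) hclen
    rw [List.getD_eq_getElem _ _ hclen] at this
    omega

-- pvStep contributes nothing for indices whose pair-with-itself already exceeds target
lemma pv_step_id (s pw : List Int) (target : Int) (hs : s.Pairwise (· ≤ ·)) (i : Nat)
    (hi : i < s.length) (hbig : target < s.getD i 0 + s.getD i 0) (acc : Int) :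
    pvStep s pw target acc i = acc := by
  unfold pvStep
  have hble : PySem.List.bisectRight s (target - s.getD i 0) ≤ i := by
    by_contra hgt
    push Not at hgt
    obtain ⟨hb0, hb1, hb2⟩ := PySem.List.bisectRight_spec s (target - s.getD i 0) hs
    have h3 := hb1 i hi hgt
    rw [List.getD_eq_getElem _ _ hi] at h3 hbig
    omega
  rw [PySem.List.pyGetD_natCast]
  have : ¬ ((i : Int) ≤ (PySem.List.bisectRight s (target - s.getD i 0) : Int) - 1) := by
    push Not
    omega
  simp only [this, if_false]

-- folding pvStep over dead indices is the identity
lemma pv_fold_id (s pw : List Int) (target : Int) (hs : s.Pairwise (· ≤ ·))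
    (m cnt : Nat) (heq : cnt = s.length - m)
    (hdead : ∀ i : Nat, m ≤ i → i < s.length → target < s.getD i 0 + s.getD i 0) (acc : Int) :
    (List.range' m cnt).foldl (pvStep s pw target) acc = acc := by
  induction cnt generalizing m acc with
  | zero => rfl
  | succ k ih =>
    rw [List.range'_succ, List.foldl_cons,
        pv_step_id s pw target hs m (by omega) (hdead m (le_refl _) (by omega)) acc]
    exact ih (m + 1) (by omega) (fun i h1 h2 => hdead i (by omega) h2) acc

-- main loop correspondence: A's two-pointer loop from state (l, r, acc) equals B's fold
-- over the remaining minima [l, n), under the invariant that every pair (i, j) with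
-- l ≤ i ≤ j and r < j has been pruned correctly (its sum exceeds target).
lemma pv_loop_eq (s pw : List Int) (target : Int) (hs : s.Pairwise (· ≤ ·)) (fuel : Nat) :
    ∀ (l r acc : Int), (r + 1 - l).toNat ≤ fuel → 0 ≤ l → r < (s.length : Int) →
    (∀ i j : Nat, l ≤ (i : Int) → i ≤ j → r < (j : Int) → j < s.length →
        target < s.getD i 0 + s.getD j 0) →
    numSubseqLoop s pw target l r acc
      = (List.range' l.toNat (s.length - l.toNat)).foldl (pvStep s pw target) acc := by
  induction fuel with
  | zero =>
    intro l r acc hfuel hl hr hinv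
    rw [numSubseqLoop]
    have hlr : ¬ (l ≤ r) := by omega
    simp only [hlr, if_false]
    exact (pv_fold_id s pw target hs l.toNat (s.length - l.toNat) rfl
      (fun i h1 h2 => hinv i i (by omega) (le_refl _) (by omega) h2) acc).symm
  | succ k ih =>
    intro l r acc hfuel hl hr hinv
    rw [numSubseqLoop]
    by_cases hlr : l ≤ r
    · have hln : l < (s.length : Int) := by omega
      have hgl : PySem.List.pyGetD s l 0 = s.getD l.toNat 0 := by
        rw [PySem.List.pyGetD_eq_getElem s 0 hl hln, List.getD_eq_getElem _ _ (by omega)]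
      have hgr : PySem.List.pyGetD s r 0 = s.getD r.toNat 0 := by
        rw [PySem.List.pyGetD_eq_getElem s 0 (by omega) hr, List.getD_eq_getElem _ _ (by omega)]
      simp only [hlr, if_true, hgl, hgr]
      by_cases hsum : s.getD l.toNat 0 + s.getD r.toNat 0 ≤ target
      · simp only [hsum, if_true]
        -- contribution step: bisect lands exactly on r
        have hbis : PySem.List.bisectRight s (target - s.getD l.toNat 0) = r.toNat + 1 := by
          apply pv_bisect_eq s _ hs _ (by omega)
          · intro idx hidx
            have hmon := pv_mono s hs idx r.toNat (by omega) (by omega)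
            omega
          · intro idx hle hlen
            have := hinv l.toNat idx (by omega) (by omega) (by omega) hlen
            omega
        have hrange : List.range' l.toNat (s.length - l.toNat)
            = l.toNat :: List.range' (l.toNat + 1) (s.length - (l.toNat + 1)) := by
          have h1 : s.length - l.toNat = (s.length - (l.toNat + 1)) + 1 := by omega
          rw [h1, List.range'_succ]
        rw [hrange, List.foldl_cons]
        have hstep : pvStep s pw target acc l.toNat
            = (acc + PySem.List.pyGetD pw (r - l) 0) % pvMOD := by
          unfold pvStep
          rw [PySem.List.pyGetD_natCast, hbis]
          have hj : ((r.toNat + 1 : Nat) : Int) - 1 = r := by omega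
          rw [hj]
          have hcond : ((l.toNat : Nat) : Int) ≤ r := by omega
          simp only [hcond, if_true]
          have : r - ((l.toNat : Nat) : Int) = r - l := by omega
          rw [this]
        rw [hstep]
        have := ih (l + 1) r ((acc + PySem.List.pyGetD pw (r - l) 0) % pvMOD)
          (by omega) (by omega) hr
          (fun i j h1 h2 h3 h4 => hinv i j (by omega) h2 h3 h4)
        rw [this]
        have : (l + 1).toNat = l.toNat + 1 := by omega
        rw [this]
      · simp only [hsum, if_false]
        push Not at hsum
        have := ih l (r - 1) acc (by omega) hl (by omega)
          (fun i j h1 h2 h3 h4 => by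
            by_cases hjr : r < (j : Int)
            · exact hinv i j h1 h2 hjr h4
            · have hjeq : (j : Int) = r := by omega
              have hmon := pv_mono s hs l.toNat i (by omega) (by omega)
              have hgj : s.getD j 0 = s.getD r.toNat 0 := by
                congr 1; omega
              rw [hgj]
              omega)
        exact this
    · simp only [hlr, if_false]
      exact (pv_fold_id s pw target hs l.toNat (s.length - l.toNat) rfl
        (fun i h1 h2 => hinv i i (by omega) (le_refl _) (by omega) h2) acc).symm

-- ===== VERDICT (by name: the statement is the Claim_ definition above) =====
theorem numSubseq_spec : Claim_equal_numSubseq := by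
  intro nums target _
  unfold Spec_numSubseq numSubseq numSubseq_alt
  set s := PySem.List.sorted nums (fun x => x) with hsdef
  have hs : s.Pairwise (· ≤ ·) := by
    have := PySem.List.sorted_pairwise nums (fun x => x)
    simpa using this
  simp only []
  rw [pv_loop_eq s ((List.range s.length).map pvPow) target hs
      ((s.length : Int) - 1 + 1 - 0).toNat 0 ((s.length : Int) - 1) 0 (le_refl _)
      (le_refl _) (by omega)
      (fun i j h1 h2 h3 h4 => by omega)]
  simp [List.range_eq_range']
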